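-- pv_equiv track=rewrite | github.com/IHateChem/Algo_practice | 프로그래머스/3/388354. 홀짝트리/홀짝트리.py | solution
-- ===== SOURCE A (Python) =====
-- def solution(nodes, edges):
--     orgNode2seq = {node: n for n, node in enumerate(nodes)}
--     seq2orgNode = {n: node for node, n in orgNode2seq.items()}
--     graph = [[] for _ in nodes]
--
--     for u, v in edges:
--         u_idx = orgNode2seq[u]
--         v_idx = orgNode2seq[v]
--         graph[u_idx].append(v_idx)
--         graph[v_idx].append(u_idx)
--
--
--     visited = [False] * len(nodes)
--     forest = []
--
--     def dfs(u, tree):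
--         visited[u] = True
--         tree.append(seq2orgNode[u])
--         for v in graph[u]:
--             if not visited[v]:
--                 dfs(v, tree)
--     # 모든 노드를 방문하며 포레스트 구성
--     for i in range(len(nodes)):
--         if not visited[i]:
--             tree = []
--             dfs(i, tree)
--             forest.append(tree)
--
--     numOfChildredIfNotRoot = [len(g) - 1 for g in graph]
--     answer = [0,0]
--     for tree in forest:
--         evenOrOdd = 0
--         reverseEvenOrOdd = 0
--         for node in tree:
--             n = orgNode2seq[node]
--             num = numOfChildredIfNotRoot[n]
--             if (node % 2 == 1 and num % 2 == 1) or (node % 2 == 0 and num % 2 == 0):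
--                 evenOrOdd += 1
--             if (node % 2 == 0 and num % 2 == 1) or (node % 2 == 1 and num % 2 == 0):
--                 reverseEvenOrOdd += 1
--         if evenOrOdd == 1:
--             answer[1] += 1
--         if reverseEvenOrOdd == 1:
--             answer[0] += 1
--
--     return answer
-- ===== SOURCE B (Python) =====
-- def solution(nodes, edges):
--     idx = {x: i for i, x in enumerate(nodes)}
--     adj = [[] for _ in nodes]
--     for e in edges:
--         a = idx[e[0]]
--         b = idx[e[1]]
--         adj[a].append(b)
--         adj[b].append(a)
--     visited = [False] * len(nodes)
--     ans_rev = 0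
--     ans_even = 0
--     for i in range(len(nodes)):
--         if visited[i]:
--             continue
--         even = 0
--         rev = 0
--         stack = [i]
--         while stack:
--             v = stack.pop()
--             if visited[v]:
--                 continue
--             visited[v] = True
--             if (nodes[v] + len(adj[v])) % 2 == 1:
--                 even += 1
--             else:
--                 rev += 1
--             stack.extend(reversed(adj[v]))
--         if even == 1:
--             ans_even += 1
--         if rev == 1:
--             ans_rev += 1
--     return [ans_rev, ans_even]
-- ===== Notes on version B (the rewrite author's own statement) =====
-- stated objective: alternative
-- what changed: Replaces A's recursive DFS that materialises a forest of label-lists plus a second counting pass (with dict lookups back to indices) by a single pass: an explicit-stack traversal over indices that tallies the two parity counters on the fly, using the arithmetic test (node+degree) % 2 instead of A's four-way case split.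
import Mathlib
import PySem

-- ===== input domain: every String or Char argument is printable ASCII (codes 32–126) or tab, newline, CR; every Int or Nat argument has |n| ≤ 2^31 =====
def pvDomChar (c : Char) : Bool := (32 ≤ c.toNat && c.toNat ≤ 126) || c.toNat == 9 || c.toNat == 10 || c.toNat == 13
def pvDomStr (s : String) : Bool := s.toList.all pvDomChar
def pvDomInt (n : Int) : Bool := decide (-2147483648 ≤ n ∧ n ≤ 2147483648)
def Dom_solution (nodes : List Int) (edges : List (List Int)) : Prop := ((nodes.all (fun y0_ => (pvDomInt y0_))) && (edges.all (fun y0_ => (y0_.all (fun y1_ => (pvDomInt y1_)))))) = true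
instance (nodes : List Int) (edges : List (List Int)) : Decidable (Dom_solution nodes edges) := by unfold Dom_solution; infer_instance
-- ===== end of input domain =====

-- B replaces A's recursive DFS + forest-of-label-lists + second counting pass by a single
-- pass: an explicit-stack traversal over index space that counts the two parities on the fly
-- (using (node+deg) % 2 instead of A's four-way case split); same return value, no recursion.

-- ===== PORT A =====
-- shared helper (both Pythons build the same node→index dict and the same adjacency lists)
def pvIdxDict (nodes : List Int) : PySem.Dict Int Int :=
  (PySem.List.enumerate nodes).foldl (fun d p => d.insert p.2 p.1) PySem.Dict.empty

def pvAppendAt (g : List (List Int)) (i v : Int) : List (List Int) :=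
  g.set i.toNat (((PySem.List.pyGet? g i).getD []) ++ [v])

def pvBuildGraph (nodes : List Int) (edges : List (List Int)) : List (List Int) :=
  edges.foldl (fun g e =>
    let u := (PySem.List.pyGet? e 0).getD 0
    let v := (PySem.List.pyGet? e 1).getD 0
    let ui := (pvIdxDict nodes).getD u 0
    let vi := (pvIdxDict nodes).getD v 0
    pvAppendAt (pvAppendAt g ui vi) vi ui)
    (nodes.map fun _ => [])

def pvAdj (graph : List (List Int)) (v : Int) : List Int :=
  (PySem.List.pyGet? graph v).getD []

-- totality fuel for the two traversals (provably sufficient: see pvSeq_fuel / pvStkB_fuel below)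
def pvFuel (graph : List (List Int)) : Nat :=
  ((graph.map List.length).sum + 1) * (graph.length + 2) + graph.length + 2

-- A's seq2orgNode dict
def pvSeqDict (nodes : List Int) : PySem.Dict Int Int :=
  (pvIdxDict nodes).items.foldl (fun d p => d.insert p.2 p.1) PySem.Dict.empty

-- A's recursive dfs, written as a worklist recursion over the pending neighbour list
def pvDfsA (graph : List (List Int)) (s2o : PySem.Dict Int Int) :
    Nat → List Int → List Bool × List Int → List Bool × List Int
  | 0, _, st => st
  | _ + 1, [], st => st
  | f + 1, v :: vs, st =>
    if st.1.getD v.toNat true then pvDfsA graph s2o f vs st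
    else
      pvDfsA graph s2o f vs
        (pvDfsA graph s2o f (pvAdj graph v)
          (st.1.set v.toNat true, st.2 ++ [s2o.getD v 0]))

def solution (nodes : List Int) (edges : List (List Int)) : List Int :=
  let o2s := pvIdxDict nodes
  let s2o := pvSeqDict nodes
  let graph := pvBuildGraph nodes edges
  let res := (PySem.List.pyRange 0 (nodes.length : Int)).foldl
    (fun (st : List Bool × List (List Int)) i =>
      if st.1.getD i.toNat true then st
      else
        let t := pvDfsA graph s2o (pvFuel graph) (pvAdj graph i)
                   (st.1.set i.toNat true, [s2o.getD i 0])
        (t.1, st.2 ++ [t.2]))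
    (List.replicate nodes.length false, [])
  let numOfChildren := graph.map (fun g => (g.length : Int) - 1)
  let ans := res.2.foldl
    (fun (ans : Int × Int) tree =>
      let c := tree.foldl
        (fun (c : Int × Int) node =>
          let nn := o2s.getD node 0
          let num := (PySem.List.pyGet? numOfChildren nn).getD 0
          ((if (PySem.Int.mod node 2 == 1 && PySem.Int.mod num 2 == 1) ||
               (PySem.Int.mod node 2 == 0 && PySem.Int.mod num 2 == 0) then c.1 + 1 else c.1),
           (if (PySem.Int.mod node 2 == 0 && PySem.Int.mod num 2 == 1) ||
               (PySem.Int.mod node 2 == 1 && PySem.Int.mod num 2 == 0) then c.2 + 1 else c.2)))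
        ((0 : Int), (0 : Int))
      ((if c.2 == 1 then ans.1 + 1 else ans.1), (if c.1 == 1 then ans.2 + 1 else ans.2)))
    ((0 : Int), (0 : Int))
  [ans.1, ans.2]

-- ===== PORT B =====
-- B's explicit stack machine; state = (visited, even-count, rev-count); top of stack = head
def pvStkB (nodes : List Int) (graph : List (List Int)) :
    Nat → List Int → List Bool × Int × Int → List Bool × Int × Int
  | 0, _, st => st
  | _ + 1, [], st => st
  | f + 1, v :: s, st =>
    if st.1.getD v.toNat true then pvStkB nodes graph f s st
    else
      let a := pvAdj graph v
      let vis := st.1.set v.toNat true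
      if PySem.Int.mod ((PySem.List.pyGet? nodes v).getD 0 + (a.length : Int)) 2 == 1 then
        pvStkB nodes graph f (a ++ s) (vis, st.2.1 + 1, st.2.2)
      else
        pvStkB nodes graph f (a ++ s) (vis, st.2.1, st.2.2 + 1)

def solution_alt (nodes : List Int) (edges : List (List Int)) : List Int :=
  let graph := pvBuildGraph nodes edges
  let res := (PySem.List.pyRange 0 (nodes.length : Int)).foldl
    (fun (st : List Bool × Int × Int) i =>
      if st.1.getD i.toNat true then st
      else
        let r := pvStkB nodes graph (pvFuel graph) [i] (st.1, 0, 0)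
        (r.1, (if r.2.2 == 1 then st.2.1 + 1 else st.2.1),
              (if r.2.1 == 1 then st.2.2 + 1 else st.2.2)))
    (List.replicate nodes.length false, (0 : Int), (0 : Int))
  [res.2.1, res.2.2]

-- ===== PRECONDITION & SPEC =====
-- Pre_ excludes exactly the inputs on which the Python A raises: duplicate node labels
-- (A's seq2orgNode dict then lacks the earlier indices → KeyError in dfs), an edge that is
-- not a 2-element list (unpacking ValueError), or an edge endpoint absent from nodes (KeyError).
def Pre_solution (nodes : List Int) (edges : List (List Int)) : Prop :=
  nodes.Nodup ∧ ∀ e ∈ edges, e.length = 2 ∧ ∀ x ∈ e, x ∈ nodes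
instance (nodes : List Int) (edges : List (List Int)) : Decidable (Pre_solution nodes edges) := by
  unfold Pre_solution; infer_instance

def pvWitness_solution : List Int × List (List Int) := ([1, 2, 4], [[1, 2]])

def Spec_solution (nodes : List Int) (edges : List (List Int)) (out : List Int) : Prop := out = solution_alt nodes edges
instance (nodes : List Int) (edges : List (List Int)) (out : List Int) : Decidable (Spec_solution nodes edges out) := by unfold Spec_solution; infer_instance

-- ===== CLAIM (what is proved, stated in full; the proofs are below) =====
def Claim_equal_solution : Prop := ∀ (nodes : List Int) (edges : List (List Int)), Dom_solution nodes edges → Pre_solution nodes edges → Spec_solution nodes edges (solution nodes edges)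

-- ===== LEMMAS AND PROOFS =====

-- measure: fuel sufficient for a traversal with worklist l and visited-array vis
def pvW (graph : List (List Int)) (vis : List Bool) (l : List Int) : Nat :=
  ((graph.map List.length).sum + 1) * (vis.count false) + l.length

-- canonical index-sequence recursion (proof-side abstraction of A's dfs)
def pvSeq (graph : List (List Int)) : Nat → List Int → List Bool → List Bool × List Int
  | 0, _, vis => (vis, [])
  | _ + 1, [], vis => (vis, [])
  | f + 1, v :: vs, vis =>
    if vis.getD v.toNat true then pvSeq graph f vs vis
    else
      let r1 := pvSeq graph f (pvAdj graph v) (vis.set v.toNat true)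
      let r2 := pvSeq graph f vs r1.1
      (r2.1, v :: r1.2 ++ r2.2)

def pvRecC (graph : List (List Int)) (l : List Int) (vis : List Bool) : List Bool × List Int :=
  pvSeq graph (pvW graph vis l) l vis

def pvStkC (nodes : List Int) (graph : List (List Int)) (s : List Int)
    (st : List Bool × Int × Int) : List Bool × Int × Int :=
  pvStkB nodes graph (pvW graph st.1 s) s st

-- B's per-node parity predicate
def pvP (nodes : List Int) (graph : List (List Int)) (v : Int) : Bool :=
  PySem.Int.mod ((PySem.List.pyGet? nodes v).getD 0 + ((pvAdj graph v).length : Int)) 2 == 1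

lemma pv_cnt_set_le (vis : List Bool) (i : Nat) :
    (vis.set i true).count false ≤ vis.count false := by
  by_cases h : i < vis.length
  · rw [List.count_set h]; simp
  · rw [List.set_eq_of_length_le (by omega)]

lemma pv_cnt_set_eq (vis : List Bool) (i : Nat) (h : vis.getD i true = false) :
    (vis.set i true).count false + 1 = vis.count false := by
  have hi : i < vis.length := by
    by_contra hn
    rw [List.getD_eq_default _ _ (by omega)] at h; exact Bool.noConfusion h
  have hv : vis[i] = false := by rwa [List.getD_eq_getElem _ _ hi] at h
  have : 0 < vis.count false := List.count_pos_iff.2 (by rw [← hv]; exact vis.getElem_mem hi)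
  rw [List.count_set hi]
  simp [hv]
  omega

lemma pv_mem_of_pyGet? {α : Type} (xs : List α) (v : Int) (x : α)
    (h : PySem.List.pyGet? xs v = some x) : x ∈ xs := by
  unfold PySem.List.pyGet? at h
  obtain ⟨k, -, hk2⟩ := Option.bind_eq_some_iff.mp h
  exact List.mem_of_getElem? hk2

lemma pv_adj_len_le (graph : List (List Int)) (v : Int) :
    (pvAdj graph v).length ≤ (graph.map List.length).sum := by
  unfold pvAdj
  cases hg : PySem.List.pyGet? graph v with
  | none => simp
  | some lst =>
    simp only [Option.getD_some]
    exact List.single_le_sum (fun _ _ => Nat.zero_le _) _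
      (List.mem_map_of_mem (pv_mem_of_pyGet? graph v lst hg))

lemma pvSeq_nil (graph : List (List Int)) (f : Nat) (vis : List Bool) :
    pvSeq graph f [] vis = (vis, []) := by cases f <;> rfl

lemma pvStkB_nil (nodes : List Int) (graph : List (List Int)) (f : Nat) (st : List Bool × Int × Int) :
    pvStkB nodes graph f [] st = st := by cases f <;> rfl

lemma pvSeq_mono (graph : List (List Int)) (f : Nat) :
    ∀ (l : List Int) (vis : List Bool),
      (pvSeq graph f l vis).1.count false ≤ vis.count false ∧
      (pvSeq graph f l vis).1.length = vis.length := by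
  induction f with
  | zero => intro l vis; simp [pvSeq]
  | succ f ih =>
    intro l vis
    cases l with
    | nil => simp [pvSeq]
    | cons v vs =>
      cases hv : vis.getD v.toNat true with
      | true =>
        simp only [pvSeq, hv]
        simpa using ih vs vis
      | false =>
        simp only [pvSeq, hv, Bool.false_eq_true, if_false]
        obtain ⟨h1c, h1l⟩ := ih (pvAdj graph v) (vis.set v.toNat true)
        obtain ⟨h2c, h2l⟩ := ih vs (pvSeq graph f (pvAdj graph v) (vis.set v.toNat true)).1
        refine ⟨le_trans h2c (le_trans h1c (pv_cnt_set_le vis v.toNat)), ?_⟩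
        rw [h2l, h1l, List.length_set]

lemma pvSeq_fuel (graph : List (List Int)) (m : Nat) :
    ∀ (f g : Nat) (l : List Int) (vis : List Bool), pvW graph vis l ≤ m →
      pvW graph vis l ≤ f → pvW graph vis l ≤ g →
      pvSeq graph f l vis = pvSeq graph g l vis := by
  induction m with
  | zero =>
    intro f g l vis hm _ _
    have : l = [] := by
      cases l with
      | nil => rfl
      | cons v vs => exfalso; simp [pvW] at hm
    subst this; rw [pvSeq_nil, pvSeq_nil]
  | succ m ih =>
    intro f g l vis hm hf hg
    cases l with
    | nil => rw [pvSeq_nil, pvSeq_nil]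
    | cons v vs =>
      have hW : pvW graph vis (v :: vs) = ((graph.map List.length).sum + 1) * vis.count false + vs.length + 1 := by
        simp [pvW]; omega
      cases f with
      | zero => exfalso; rw [hW] at hf; omega
      | succ f =>
      cases g with
      | zero => exfalso; rw [hW] at hg; omega
      | succ g =>
      cases hv : vis.getD v.toNat true with
      | true =>
        simp only [pvSeq, hv, if_true]
        exact ih f g vs vis (by simp [pvW] at hm ⊢; omega) (by simp [pvW] at hf ⊢; omega)
          (by simp [pvW] at hg ⊢; omega)
      | false =>
        simp only [pvSeq, hv, Bool.false_eq_true, if_false]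
        have hcnt := pv_cnt_set_eq vis v.toNat hv
        have hadj := pv_adj_len_le graph v
        have hexp : ∀ k : Nat, pvW graph vis (v :: vs) ≤ k →
            ((graph.map List.length).sum + 1) * ((vis.set v.toNat true).count false) +
              ((graph.map List.length).sum + 1) + vs.length + 1 ≤ k := by
          intro k hk
          rw [hW, ← hcnt, Nat.mul_succ] at hk
          omega
        have hm' := hexp (m + 1) hm
        have hf' := hexp (f + 1) hf
        have hg' := hexp (g + 1) hg
        have h1 : pvSeq graph f (pvAdj graph v) (vis.set v.toNat true) =
            pvSeq graph g (pvAdj graph v) (vis.set v.toNat true) := by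
          apply ih f g <;> · simp only [pvW]; omega
        rw [h1]
        have hmono := (pvSeq_mono graph g (pvAdj graph v) (vis.set v.toNat true)).1
        have hmul : ((graph.map List.length).sum + 1) *
            ((pvSeq graph g (pvAdj graph v) (vis.set v.toNat true)).1.count false) ≤
            ((graph.map List.length).sum + 1) * ((vis.set v.toNat true).count false) :=
          Nat.mul_le_mul_left _ hmono
        have h2 : pvSeq graph f vs (pvSeq graph g (pvAdj graph v) (vis.set v.toNat true)).1 =
            pvSeq graph g vs (pvSeq graph g (pvAdj graph v) (vis.set v.toNat true)).1 := by
          apply ih f g <;> · simp only [pvW]; omega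
        rw [h2]

lemma pvSeq_eq_recC (graph : List (List Int)) (f : Nat) (l : List Int) (vis : List Bool)
    (h : pvW graph vis l ≤ f) : pvSeq graph f l vis = pvRecC graph l vis := by
  exact pvSeq_fuel graph (pvW graph vis l) f (pvW graph vis l) l vis le_rfl h le_rfl

lemma pvRecC_nil (graph : List (List Int)) (vis : List Bool) :
    pvRecC graph [] vis = (vis, []) := by
  unfold pvRecC; exact pvSeq_nil graph _ vis

lemma pvRecC_mono (graph : List (List Int)) (l : List Int) (vis : List Bool) :
    (pvRecC graph l vis).1.count false ≤ vis.count false ∧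
    (pvRecC graph l vis).1.length = vis.length := by
  unfold pvRecC; exact pvSeq_mono graph _ l vis

lemma pvRecC_cons_visited (graph : List (List Int)) (v : Int) (vs : List Int) (vis : List Bool)
    (h : vis.getD v.toNat true = true) :
    pvRecC graph (v :: vs) vis = pvRecC graph vs vis := by
  unfold pvRecC
  have hW : pvW graph vis (v :: vs) = (((graph.map List.length).sum + 1) * vis.count false + vs.length) + 1 := by
    simp [pvW]; omega
  rw [hW]
  simp only [pvSeq, h, if_true]
  exact pvSeq_eq_recC graph _ vs vis (by simp only [pvW]; omega)

lemma pvRecC_cons_new (graph : List (List Int)) (v : Int) (vs : List Int) (vis : List Bool)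
    (h : vis.getD v.toNat true = false) :
    pvRecC graph (v :: vs) vis =
      (let r1 := pvRecC graph (pvAdj graph v) (vis.set v.toNat true)
       let r2 := pvRecC graph vs r1.1
       (r2.1, v :: r1.2 ++ r2.2)) := by
  unfold pvRecC
  have hW : pvW graph vis (v :: vs) = (((graph.map List.length).sum + 1) * vis.count false + vs.length) + 1 := by
    simp [pvW]; omega
  rw [hW]
  simp only [pvSeq, h, Bool.false_eq_true, if_false]
  have hcnt := pv_cnt_set_eq vis v.toNat h
  have hadj := pv_adj_len_le graph v
  have h1 : pvSeq graph (((graph.map List.length).sum + 1) * vis.count false + vs.length)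
      (pvAdj graph v) (vis.set v.toNat true) = pvRecC graph (pvAdj graph v) (vis.set v.toNat true) := by
    apply pvSeq_eq_recC
    simp only [pvW]
    rw [← hcnt, Nat.mul_succ]
    omega
  rw [h1]
  have hmono := (pvRecC_mono graph (pvAdj graph v) (vis.set v.toNat true)).1
  have hmul : ((graph.map List.length).sum + 1) *
      ((pvRecC graph (pvAdj graph v) (vis.set v.toNat true)).1.count false) ≤
      ((graph.map List.length).sum + 1) * ((vis.set v.toNat true).count false) :=
    Nat.mul_le_mul_left _ hmono
  have h2 : pvSeq graph (((graph.map List.length).sum + 1) * vis.count false + vs.length)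
      vs (pvRecC graph (pvAdj graph v) (vis.set v.toNat true)).1 =
      pvRecC graph vs (pvRecC graph (pvAdj graph v) (vis.set v.toNat true)).1 := by
    apply pvSeq_eq_recC
    simp only [pvW]
    have hx : ((graph.map List.length).sum + 1) * ((vis.set v.toNat true).count false) +
        ((graph.map List.length).sum + 1) = ((graph.map List.length).sum + 1) * vis.count false := by
      rw [← hcnt, Nat.mul_succ]
    omega
  rw [h2]
  rfl

lemma pvStkB_fuel (nodes : List Int) (graph : List (List Int)) (m : Nat) :
    ∀ (f g : Nat) (s : List Int) (st : List Bool × Int × Int), pvW graph st.1 s ≤ m →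
      pvW graph st.1 s ≤ f → pvW graph st.1 s ≤ g →
      pvStkB nodes graph f s st = pvStkB nodes graph g s st := by
  induction m with
  | zero =>
    intro f g s st hm _ _
    have : s = [] := by
      cases s with
      | nil => rfl
      | cons v vs => exfalso; simp [pvW] at hm
    subst this; rw [pvStkB_nil, pvStkB_nil]
  | succ m ih =>
    intro f g s st hm hf hg
    cases s with
    | nil => rw [pvStkB_nil, pvStkB_nil]
    | cons v vs =>
      obtain ⟨vis, e, o⟩ := st
      simp only [pvW, List.length_cons] at hm hf hg
      cases f with
      | zero => exfalso; omega
      | succ f =>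
      cases g with
      | zero => exfalso; omega
      | succ g =>
      cases hv : vis.getD v.toNat true with
      | true =>
        simp only [pvStkB, hv, if_true]
        exact ih f g vs (vis, e, o) (by simp only [pvW]; omega)
          (by simp only [pvW]; omega) (by simp only [pvW]; omega)
      | false =>
        simp only [pvStkB, hv, Bool.false_eq_true, if_false]
        have hcnt := pv_cnt_set_eq vis v.toNat hv
        have hadj := pv_adj_len_le graph v
        have hbound : ∀ k : Nat, ((graph.map List.length).sum + 1) * vis.count false + vs.length + 1 ≤ k →
            pvW graph (vis.set v.toNat true) (pvAdj graph v ++ vs) ≤ k - 1 := by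
          intro k hk
          simp only [pvW, List.length_append] at hk ⊢
          rw [← hcnt, Nat.mul_succ] at hk
          omega
        split
        · exact ih f g _ _ (hbound (m + 1) hm) (hbound (f + 1) hf) (hbound (g + 1) hg)
        · exact ih f g _ _ (hbound (m + 1) hm) (hbound (f + 1) hf) (hbound (g + 1) hg)

lemma pvStkB_eq_stkC (nodes : List Int) (graph : List (List Int)) (f : Nat) (s : List Int)
    (st : List Bool × Int × Int) (h : pvW graph st.1 s ≤ f) :
    pvStkB nodes graph f s st = pvStkC nodes graph s st := by
  exact pvStkB_fuel nodes graph (pvW graph st.1 s) f (pvW graph st.1 s) s st le_rfl h le_rfl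

lemma pvStkC_nil (nodes : List Int) (graph : List (List Int)) (st : List Bool × Int × Int) :
    pvStkC nodes graph [] st = st := by
  unfold pvStkC; exact pvStkB_nil nodes graph _ st

lemma pvStkC_cons_visited (nodes : List Int) (graph : List (List Int)) (v : Int) (s : List Int)
    (st : List Bool × Int × Int) (h : st.1.getD v.toNat true = true) :
    pvStkC nodes graph (v :: s) st = pvStkC nodes graph s st := by
  obtain ⟨vis, e, o⟩ := st
  unfold pvStkC
  simp only at h
  have hW : pvW graph vis (v :: s) = (((graph.map List.length).sum + 1) * vis.count false + s.length) + 1 := by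
    simp [pvW]; omega
  simp only [hW]
  simp only [pvStkB, h, if_true]
  exact pvStkB_fuel nodes graph _ _ _ s (vis, e, o) le_rfl (by simp only [pvW]; omega) le_rfl

lemma pvStkC_cons_new (nodes : List Int) (graph : List (List Int)) (v : Int) (s : List Int)
    (st : List Bool × Int × Int) (h : st.1.getD v.toNat true = false) :
    pvStkC nodes graph (v :: s) st =
      pvStkC nodes graph (pvAdj graph v ++ s)
        (st.1.set v.toNat true,
         (if pvP nodes graph v then st.2.1 + 1 else st.2.1),
         (if pvP nodes graph v then st.2.2 else st.2.2 + 1)) := by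
  obtain ⟨vis, e, o⟩ := st
  unfold pvStkC
  simp only at h ⊢
  have hW : pvW graph vis (v :: s) = (((graph.map List.length).sum + 1) * vis.count false + s.length) + 1 := by
    simp [pvW]; omega
  simp only [hW]
  simp only [pvStkB, h, Bool.false_eq_true, if_false]
  have hcnt := pv_cnt_set_eq vis v.toNat h
  have hadj := pv_adj_len_le graph v
  have hb : pvW graph (vis.set v.toNat true) (pvAdj graph v ++ s) ≤
      ((graph.map List.length).sum + 1) * vis.count false + s.length := by
    simp only [pvW, List.length_append]
    rw [← hcnt, Nat.mul_succ]
    omega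
  unfold pvP
  split
  · exact pvStkB_fuel nodes graph _ _ _ _ _ hb hb le_rfl
  · exact pvStkB_fuel nodes graph _ _ _ _ _ hb hb le_rfl

-- MAIN: the stack machine run on l ++ s performs A's recursive visit of l, bumping the counters
lemma pvMain (nodes : List Int) (graph : List (List Int)) (m : Nat) :
    ∀ (l s : List Int) (vis : List Bool) (e o : Int), pvW graph vis l ≤ m →
      pvStkC nodes graph (l ++ s) (vis, e, o) =
        pvStkC nodes graph s ((pvRecC graph l vis).1,
          e + ((pvRecC graph l vis).2.countP (pvP nodes graph) : Int),
          o + ((pvRecC graph l vis).2.countP (fun v => ! pvP nodes graph v) : Int)) := by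
  induction m with
  | zero =>
    intro l s vis e o hm
    have : l = [] := by
      cases l with
      | nil => rfl
      | cons v vs => exfalso; simp [pvW] at hm
    subst this
    simp [pvRecC_nil]
  | succ m ih =>
    intro l s vis e o hm
    cases l with
    | nil => simp [pvRecC_nil]
    | cons v vs =>
      simp only [pvW, List.length_cons] at hm
      cases hv : vis.getD v.toNat true with
      | true =>
        rw [List.cons_append, pvStkC_cons_visited nodes graph v (vs ++ s) (vis, e, o) hv,
          pvRecC_cons_visited graph v vs vis hv]
        exact ih vs s vis e o (by simp only [pvW]; omega)
      | false =>
        have hcnt := pv_cnt_set_eq vis v.toNat hv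
        have hadj := pv_adj_len_le graph v
        have hx : ((graph.map List.length).sum + 1) * ((vis.set v.toNat true).count false) +
            ((graph.map List.length).sum + 1) = ((graph.map List.length).sum + 1) * vis.count false := by
          rw [← hcnt, Nat.mul_succ]
        have hbA : pvW graph (vis.set v.toNat true) (pvAdj graph v) ≤ m := by
          simp only [pvW]; omega
        have hmono := (pvRecC_mono graph (pvAdj graph v) (vis.set v.toNat true)).1
        have hmul : ((graph.map List.length).sum + 1) *
            ((pvRecC graph (pvAdj graph v) (vis.set v.toNat true)).1.count false) ≤
            ((graph.map List.length).sum + 1) * ((vis.set v.toNat true).count false) :=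
          Nat.mul_le_mul_left _ hmono
        have hbB : pvW graph (pvRecC graph (pvAdj graph v) (vis.set v.toNat true)).1 vs ≤ m := by
          simp only [pvW]; omega
        rw [List.cons_append, pvStkC_cons_new nodes graph v (vs ++ s) (vis, e, o) hv]
        rw [ih (pvAdj graph v) (vs ++ s) (vis.set v.toNat true) _ _ hbA]
        rw [ih vs s (pvRecC graph (pvAdj graph v) (vis.set v.toNat true)).1 _ _ hbB]
        rw [pvRecC_cons_new graph v vs vis hv]
        simp only [List.countP_cons, List.countP_append]
        cases hp : pvP nodes graph v <;>
          · simp only [if_true, if_false, Bool.false_eq_true]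
            refine congrArg _ ?_
            refine Prod.ext rfl (Prod.ext ?_ ?_) <;> · simp; ring

-- every visited index satisfies any predicate closed under the worklist and the adjacency lists
lemma pvRecC_valid (graph : List (List Int)) (Q : Int → Prop)
    (hg : ∀ u w, w ∈ pvAdj graph u → Q w) (m : Nat) :
    ∀ (l : List Int) (vis : List Bool), pvW graph vis l ≤ m → (∀ v ∈ l, Q v) →
      ∀ x ∈ (pvRecC graph l vis).2, Q x := by
  induction m with
  | zero =>
    intro l vis hm hl
    cases l with
    | nil => rw [pvRecC_nil]; intro x hx; exact absurd hx (List.not_mem_nil)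
    | cons v vs => exfalso; simp [pvW] at hm
  | succ m ih =>
    intro l vis hm hl
    cases l with
    | nil => rw [pvRecC_nil]; intro x hx; exact absurd hx (List.not_mem_nil)
    | cons v vs =>
      simp only [pvW, List.length_cons] at hm
      cases hv : vis.getD v.toNat true with
      | true =>
        rw [pvRecC_cons_visited graph v vs vis hv]
        exact ih vs vis (by simp only [pvW]; omega) (fun x hx => hl x (List.mem_cons_of_mem _ hx))
      | false =>
        have hcnt := pv_cnt_set_eq vis v.toNat hv
        have hadj := pv_adj_len_le graph v
        have hx : ((graph.map List.length).sum + 1) * ((vis.set v.toNat true).count false) +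
            ((graph.map List.length).sum + 1) = ((graph.map List.length).sum + 1) * vis.count false := by
          rw [← hcnt, Nat.mul_succ]
        have hbA : pvW graph (vis.set v.toNat true) (pvAdj graph v) ≤ m := by
          simp only [pvW]; omega
        have hmono := (pvRecC_mono graph (pvAdj graph v) (vis.set v.toNat true)).1
        have hmul : ((graph.map List.length).sum + 1) *
            ((pvRecC graph (pvAdj graph v) (vis.set v.toNat true)).1.count false) ≤
            ((graph.map List.length).sum + 1) * ((vis.set v.toNat true).count false) :=
          Nat.mul_le_mul_left _ hmono
        have hbB : pvW graph (pvRecC graph (pvAdj graph v) (vis.set v.toNat true)).1 vs ≤ m := by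
          simp only [pvW]; omega
        rw [pvRecC_cons_new graph v vs vis hv]
        intro x hx2
        have hx3 : x = v ∨ x ∈ (pvRecC graph (pvAdj graph v) (vis.set v.toNat true)).2 ∨
            x ∈ (pvRecC graph vs (pvRecC graph (pvAdj graph v) (vis.set v.toNat true)).1).2 := by
          simpa using hx2
        rcases hx3 with rfl | hx3 | hx3
        · exact hl x List.mem_cons_self
        · exact ih (pvAdj graph v) (vis.set v.toNat true) hbA (fun w hw => hg v w hw) x hx3
        · exact ih vs (pvRecC graph (pvAdj graph v) (vis.set v.toNat true)).1 hbB
            (fun w hw => hl w (List.mem_cons_of_mem _ hw)) x hx3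

-- A's dfs = canonical sequence + label map
lemma pvDfsA_bridge (graph : List (List Int)) (s2o : PySem.Dict Int Int) (f : Nat) :
    ∀ (l : List Int) (vis : List Bool) (t : List Int),
      pvDfsA graph s2o f l (vis, t) =
        ((pvSeq graph f l vis).1,
         t ++ (pvSeq graph f l vis).2.map (fun v => s2o.getD v 0)) := by
  induction f with
  | zero => intro l vis t; simp [pvDfsA, pvSeq]
  | succ f ih =>
    intro l vis t
    cases l with
    | nil => simp [pvDfsA, pvSeq]
    | cons v vs =>
      cases hv : vis.getD v.toNat true with
      | true =>
        simp only [pvDfsA, pvSeq, hv, if_true]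
        exact ih vs vis t
      | false =>
        simp only [pvDfsA, pvSeq, hv, Bool.false_eq_true, if_false]
        rw [ih (pvAdj graph v) (vis.set v.toNat true) (t ++ [s2o.getD v 0])]
        rw [ih vs (pvSeq graph f (pvAdj graph v) (vis.set v.toNat true)).1
          ((t ++ [s2o.getD v 0]) ++ (pvSeq graph f (pvAdj graph v) (vis.set v.toNat true)).2.map (fun v => s2o.getD v 0))]
        simp [List.map_append, List.append_assoc]

-- dictionary facts under Nodup
lemma pvIdxDict_items (nodes : List Int) (h : nodes.Nodup) :
    (pvIdxDict nodes).items =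
      (PySem.List.enumerate nodes).map (fun p => (p.2, p.1)) := by
  unfold pvIdxDict
  rw [PySem.Dict.items_foldl_insert_fresh (PySem.List.enumerate nodes)
    (fun p => p.2) (fun p => p.1) PySem.Dict.empty
    (fun a _ => PySem.Dict.contains_empty _)
    (by rw [PySem.List.map_snd_enumerate]; exact h)]
  simp [PySem.Dict.empty]

lemma pvIdxDict_getD (nodes : List Int) (h : nodes.Nodup) (i : Nat) (hi : i < nodes.length) :
    (pvIdxDict nodes).getD nodes[i] 0 = (i : Int) := by
  have hmem : (nodes[i], (i : Int)) ∈ (pvIdxDict nodes).items := by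
    rw [pvIdxDict_items nodes h]
    refine List.mem_map.mpr ⟨((i : Int), nodes[i]), ?_, rfl⟩
    rw [PySem.List.mem_enumerate_iff]
    exact ⟨i, hi, by simp⟩
  have hnd : (pvIdxDict nodes).keys.Nodup := by
    unfold pvIdxDict
    exact PySem.Dict.nodup_keys_foldl_insert_key _ _ _ _ PySem.Dict.nodup_keys_empty
  have hg := PySem.Dict.get?_of_mem_items _ hmem hnd
  simp [PySem.Dict.getD, hg]

lemma pvSeqDict_getD (nodes : List Int) (h : nodes.Nodup) (i : Nat) (hi : i < nodes.length) :
    (pvSeqDict nodes).getD (i : Int) 0 = nodes[i] := by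
  have hitems : (pvSeqDict nodes).items = PySem.List.enumerate nodes := by
    unfold pvSeqDict
    rw [pvIdxDict_items nodes h]
    rw [PySem.Dict.items_foldl_insert_fresh
      ((PySem.List.enumerate nodes).map (fun p => (p.2, p.1)))
      (fun (p : Int × Int) => p.2) (fun (p : Int × Int) => p.1) PySem.Dict.empty
      (fun a _ => PySem.Dict.contains_empty _) ?nd]
    case nd =>
      rw [List.map_map]
      have : ((fun (p : Int × Int) => p.2) ∘ fun (p : Int × Int) => (p.2, p.1)) = fun p => p.1 := rfl
      rw [this, PySem.List.map_fst_enumerate]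
      exact PySem.List.nodup_pyRange_one 0 _
    rw [List.map_map]
    have : ((fun (p : Int × Int) => (p.2, p.1)) ∘ fun (p : Int × Int) => (p.2, p.1)) = id := rfl
    rw [this, List.map_id]
    simp [PySem.Dict.empty]
  have hmem : ((i : Int), nodes[i]) ∈ (pvSeqDict nodes).items := by
    rw [hitems, PySem.List.mem_enumerate_iff]
    exact ⟨i, hi, by simp⟩
  have hnd : (pvSeqDict nodes).keys.Nodup := by
    unfold pvSeqDict
    exact PySem.Dict.nodup_keys_foldl_insert_key _ _ _ _ PySem.Dict.nodup_keys_empty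
  have hg := PySem.Dict.get?_of_mem_items _ hmem hnd
  simp [PySem.Dict.getD, hg]

-- graph shape under Pre_
lemma pvGraph_length (nodes : List Int) (edges : List (List Int)) :
    (pvBuildGraph nodes edges).length = nodes.length := by
  unfold pvBuildGraph
  have hgo : ∀ (es : List (List Int)) (g : List (List Int)),
      (es.foldl (fun g e =>
        let u := (PySem.List.pyGet? e 0).getD 0
        let v := (PySem.List.pyGet? e 1).getD 0
        let ui := (pvIdxDict nodes).getD u 0
        let vi := (pvIdxDict nodes).getD v 0
        pvAppendAt (pvAppendAt g ui vi) vi ui) g).length = g.length := by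
    intro es
    induction es with
    | nil => intro g; rfl
    | cons e es ih =>
      intro g
      rw [List.foldl_cons, ih]
      simp [pvAppendAt, List.length_set]
  rw [hgo, List.length_map]

lemma pvGraph_closed (nodes : List Int) (edges : List (List Int))
    (hpre : Pre_solution nodes edges) :
    ∀ u w, w ∈ pvAdj (pvBuildGraph nodes edges) u →
      ∃ k : Nat, k < nodes.length ∧ w = (k : Int) := by
  obtain ⟨hnd, hed⟩ := hpre
  have hidx : ∀ x ∈ nodes, ∃ k : Nat, k < nodes.length ∧ (pvIdxDict nodes).getD x 0 = (k : Int) := by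
    intro x hx
    obtain ⟨k, hk, rfl⟩ := List.mem_iff_getElem.mp hx
    exact ⟨k, hk, pvIdxDict_getD nodes hnd k hk⟩
  have happ : ∀ (g : List (List Int)) (i x : Int),
      (∀ lst ∈ g, ∀ w ∈ lst, ∃ k : Nat, k < nodes.length ∧ w = (k : Int)) →
      (∃ k : Nat, k < nodes.length ∧ x = (k : Int)) →
      ∀ lst ∈ pvAppendAt g i x, ∀ w ∈ lst, ∃ k : Nat, k < nodes.length ∧ w = (k : Int) := by
    intro g i x hg hx lst hlst w hw
    unfold pvAppendAt at hlst
    rcases List.mem_or_eq_of_mem_set hlst with hmem | rfl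
    · exact hg lst hmem w hw
    · rcases List.mem_append.mp hw with hw | hw
      · cases hget : PySem.List.pyGet? g i with
        | none => rw [hget] at hw; simp at hw
        | some old =>
          rw [hget] at hw
          exact hg old (pv_mem_of_pyGet? g i old hget) w hw
      · rw [List.mem_singleton.mp hw]; exact hx
  have hgo : ∀ (es : List (List Int)) (g : List (List Int)),
      (∀ e ∈ es, e.length = 2 ∧ ∀ x ∈ e, x ∈ nodes) →
      (∀ lst ∈ g, ∀ w ∈ lst, ∃ k : Nat, k < nodes.length ∧ w = (k : Int)) →
      ∀ lst ∈ es.foldl (fun g e =>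
        let u := (PySem.List.pyGet? e 0).getD 0
        let v := (PySem.List.pyGet? e 1).getD 0
        let ui := (pvIdxDict nodes).getD u 0
        let vi := (pvIdxDict nodes).getD v 0
        pvAppendAt (pvAppendAt g ui vi) vi ui) g, ∀ w ∈ lst, ∃ k : Nat, k < nodes.length ∧ w = (k : Int) := by
    intro es
    induction es with
    | nil => intro g _ hg; exact hg
    | cons e es ih =>
      intro g hes hg
      rw [List.foldl_cons]
      obtain ⟨hlen, hin⟩ := hes e List.mem_cons_self
      obtain ⟨a, b, rfl⟩ := List.length_eq_two.mp hlen
      have ha : (PySem.List.pyGet? [a, b] 0).getD 0 = a := rfl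
      have hb : (PySem.List.pyGet? [a, b] 1).getD 0 = b := rfl
      refine ih _ (fun e' he' => hes e' (List.mem_cons_of_mem _ he')) ?_
      simp only [ha, hb]
      refine happ _ _ _ (happ _ _ _ hg ?_) ?_
      · exact hidx b (hin b (by simp))
      · exact hidx a (hin a (by simp))
  intro u w hw
  unfold pvAdj at hw
  cases hget : PySem.List.pyGet? (pvBuildGraph nodes edges) u with
  | none => rw [hget] at hw; simp at hw
  | some lst =>
    rw [hget] at hw
    simp only [Option.getD_some] at hw
    have hlst := pv_mem_of_pyGet? _ u lst hget
    unfold pvBuildGraph at hlst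
    exact hgo edges _ hed (by intro l hl; rw [List.mem_map] at hl; obtain ⟨_, _, rfl⟩ := hl; simp) lst hlst w hw

-- the per-node condition equivalence: A's four-way test = B's parity test (valid index)
lemma pvCond (nodes : List Int) (edges : List (List Int)) (h : nodes.Nodup)
    (k : Nat) (hk : k < nodes.length) :
    (let graph := pvBuildGraph nodes edges
     let node := nodes[k]
     let num := (PySem.List.pyGet? (graph.map (fun g => ((g.length : Int) - 1))) ((pvIdxDict nodes).getD node 0)).getD 0
     ((PySem.Int.mod node 2 == 1 && PySem.Int.mod num 2 == 1) ||
      (PySem.Int.mod node 2 == 0 && PySem.Int.mod num 2 == 0)) = pvP nodes graph (k : Int) ∧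
     ((PySem.Int.mod node 2 == 0 && PySem.Int.mod num 2 == 1) ||
      (PySem.Int.mod node 2 == 1 && PySem.Int.mod num 2 == 0)) = ! pvP nodes graph (k : Int)) := by
  have hg := pvGraph_length nodes edges
  have hk' : k < (pvBuildGraph nodes edges).length := by rw [hg]; exact hk
  have hidx : (pvIdxDict nodes).getD nodes[k] 0 = (k : Int) := pvIdxDict_getD nodes h k hk
  have hnum : (PySem.List.pyGet? ((pvBuildGraph nodes edges).map (fun g => ((g.length : Int) - 1)))
      ((k : Nat) : Int)).getD 0 = ((pvBuildGraph nodes edges)[k].length : Int) - 1 := by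
    rw [PySem.List.pyGet?_natCast]
    simp [hk']
  have hadjk : pvAdj (pvBuildGraph nodes edges) ((k : Nat) : Int) = (pvBuildGraph nodes edges)[k] := by
    unfold pvAdj
    rw [PySem.List.pyGet?_natCast]
    simp [hk']
  have hnode : (PySem.List.pyGet? nodes ((k : Nat) : Int)).getD 0 = nodes[k] := by
    rw [PySem.List.pyGet?_natCast]
    simp [hk]
  have hm2 : ∀ x : Int, PySem.Int.mod x 2 = x % 2 := fun x =>
    PySem.Int.mod_eq_emod_of_pos (by norm_num)
  simp only [hidx, hnum]
  unfold pvP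
  simp only [hadjk, hnode]
  constructor <;>
    · rw [Bool.eq_iff_iff]
      simp only [hm2, Bool.or_eq_true, Bool.and_eq_true, beq_iff_eq, Bool.not_eq_eq_eq_not,
        Bool.not_true, beq_eq_false_iff_ne, ne_eq]
      omega


-- A's post-loop answer fold over a forest
def pvAns (nodes : List Int) (edges : List (List Int)) (forest : List (List Int)) : Int × Int :=
  forest.foldl
    (fun (ans : Int × Int) tree =>
      let c := tree.foldl
        (fun (c : Int × Int) node =>
          let nn := (pvIdxDict nodes).getD node 0
          let num := (PySem.List.pyGet? ((pvBuildGraph nodes edges).map (fun g => ((g.length : Int) - 1))) nn).getD 0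
          ((if (PySem.Int.mod node 2 == 1 && PySem.Int.mod num 2 == 1) ||
               (PySem.Int.mod node 2 == 0 && PySem.Int.mod num 2 == 0) then c.1 + 1 else c.1),
           (if (PySem.Int.mod node 2 == 0 && PySem.Int.mod num 2 == 1) ||
               (PySem.Int.mod node 2 == 1 && PySem.Int.mod num 2 == 0) then c.2 + 1 else c.2)))
        ((0 : Int), (0 : Int))
      ((if c.2 == 1 then ans.1 + 1 else ans.1), (if c.1 == 1 then ans.2 + 1 else ans.2)))
    ((0 : Int), (0 : Int))

lemma pvTreeCount (nodes : List Int) (edges : List (List Int)) (h : nodes.Nodup) (seq : List Int)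
    (hv : ∀ x ∈ seq, ∃ k : Nat, k < nodes.length ∧ x = (k : Int)) :
    (seq.map (fun v => (pvSeqDict nodes).getD v 0)).foldl
      (fun (c : Int × Int) node =>
        let nn := (pvIdxDict nodes).getD node 0
        let num := (PySem.List.pyGet? ((pvBuildGraph nodes edges).map (fun g => ((g.length : Int) - 1))) nn).getD 0
        ((if (PySem.Int.mod node 2 == 1 && PySem.Int.mod num 2 == 1) ||
             (PySem.Int.mod node 2 == 0 && PySem.Int.mod num 2 == 0) then c.1 + 1 else c.1),
         (if (PySem.Int.mod node 2 == 0 && PySem.Int.mod num 2 == 1) ||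
             (PySem.Int.mod node 2 == 1 && PySem.Int.mod num 2 == 0) then c.2 + 1 else c.2)))
      ((0 : Int), (0 : Int))
    = ((seq.countP (pvP nodes (pvBuildGraph nodes edges)) : Int),
       (seq.countP (fun v => ! pvP nodes (pvBuildGraph nodes edges) v) : Int)) := by
  rw [List.foldl_map]
  rw [PySem.List.foldl_prod_mk
    (f := fun (x : Int) v =>
      if (PySem.Int.mod ((pvSeqDict nodes).getD v 0) 2 == 1 &&
          PySem.Int.mod ((PySem.List.pyGet? ((pvBuildGraph nodes edges).map (fun g => ((g.length : Int) - 1))) ((pvIdxDict nodes).getD ((pvSeqDict nodes).getD v 0) 0)).getD 0) 2 == 1) ||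
         (PySem.Int.mod ((pvSeqDict nodes).getD v 0) 2 == 0 &&
          PySem.Int.mod ((PySem.List.pyGet? ((pvBuildGraph nodes edges).map (fun g => ((g.length : Int) - 1))) ((pvIdxDict nodes).getD ((pvSeqDict nodes).getD v 0) 0)).getD 0) 2 == 0)
      then x + 1 else x)
    (g := fun (x : Int) v =>
      if (PySem.Int.mod ((pvSeqDict nodes).getD v 0) 2 == 0 &&
          PySem.Int.mod ((PySem.List.pyGet? ((pvBuildGraph nodes edges).map (fun g => ((g.length : Int) - 1))) ((pvIdxDict nodes).getD ((pvSeqDict nodes).getD v 0) 0)).getD 0) 2 == 1) ||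
         (PySem.Int.mod ((pvSeqDict nodes).getD v 0) 2 == 1 &&
          PySem.Int.mod ((PySem.List.pyGet? ((pvBuildGraph nodes edges).map (fun g => ((g.length : Int) - 1))) ((pvIdxDict nodes).getD ((pvSeqDict nodes).getD v 0) 0)).getD 0) 2 == 0)
      then x + 1 else x)]
  rw [PySem.List.foldl_if_add_one, PySem.List.foldl_if_add_one]
  have hc1 : ∀ v ∈ seq,
      ((PySem.Int.mod ((pvSeqDict nodes).getD v 0) 2 == 1 &&
        PySem.Int.mod ((PySem.List.pyGet? ((pvBuildGraph nodes edges).map (fun g => ((g.length : Int) - 1))) ((pvIdxDict nodes).getD ((pvSeqDict nodes).getD v 0) 0)).getD 0) 2 == 1) ||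
       (PySem.Int.mod ((pvSeqDict nodes).getD v 0) 2 == 0 &&
        PySem.Int.mod ((PySem.List.pyGet? ((pvBuildGraph nodes edges).map (fun g => ((g.length : Int) - 1))) ((pvIdxDict nodes).getD ((pvSeqDict nodes).getD v 0) 0)).getD 0) 2 == 0))
      = pvP nodes (pvBuildGraph nodes edges) v := by
    intro v hvm
    obtain ⟨k, hk, rfl⟩ := hv v hvm
    rw [pvSeqDict_getD nodes h k hk]
    exact (pvCond nodes edges h k hk).1
  have hc2 : ∀ v ∈ seq,
      ((PySem.Int.mod ((pvSeqDict nodes).getD v 0) 2 == 0 &&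
        PySem.Int.mod ((PySem.List.pyGet? ((pvBuildGraph nodes edges).map (fun g => ((g.length : Int) - 1))) ((pvIdxDict nodes).getD ((pvSeqDict nodes).getD v 0) 0)).getD 0) 2 == 1) ||
       (PySem.Int.mod ((pvSeqDict nodes).getD v 0) 2 == 1 &&
        PySem.Int.mod ((PySem.List.pyGet? ((pvBuildGraph nodes edges).map (fun g => ((g.length : Int) - 1))) ((pvIdxDict nodes).getD ((pvSeqDict nodes).getD v 0) 0)).getD 0) 2 == 0))
      = (! pvP nodes (pvBuildGraph nodes edges) v) := by
    intro v hvm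
    obtain ⟨k, hk, rfl⟩ := hv v hvm
    rw [pvSeqDict_getD nodes h k hk]
    exact (pvCond nodes edges h k hk).2
  have e1 : seq.countP (fun v =>
      (PySem.Int.mod ((pvSeqDict nodes).getD v 0) 2 == 1 &&
        PySem.Int.mod ((PySem.List.pyGet? ((pvBuildGraph nodes edges).map (fun g => ((g.length : Int) - 1))) ((pvIdxDict nodes).getD ((pvSeqDict nodes).getD v 0) 0)).getD 0) 2 == 1) ||
      (PySem.Int.mod ((pvSeqDict nodes).getD v 0) 2 == 0 &&
        PySem.Int.mod ((PySem.List.pyGet? ((pvBuildGraph nodes edges).map (fun g => ((g.length : Int) - 1))) ((pvIdxDict nodes).getD ((pvSeqDict nodes).getD v 0) 0)).getD 0) 2 == 0)) =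
      seq.countP (pvP nodes (pvBuildGraph nodes edges)) :=
    List.countP_congr (fun a ha => by rw [hc1 a ha])
  have e2 : seq.countP (fun v =>
      (PySem.Int.mod ((pvSeqDict nodes).getD v 0) 2 == 0 &&
        PySem.Int.mod ((PySem.List.pyGet? ((pvBuildGraph nodes edges).map (fun g => ((g.length : Int) - 1))) ((pvIdxDict nodes).getD ((pvSeqDict nodes).getD v 0) 0)).getD 0) 2 == 1) ||
      (PySem.Int.mod ((pvSeqDict nodes).getD v 0) 2 == 1 &&
        PySem.Int.mod ((PySem.List.pyGet? ((pvBuildGraph nodes edges).map (fun g => ((g.length : Int) - 1))) ((pvIdxDict nodes).getD ((pvSeqDict nodes).getD v 0) 0)).getD 0) 2 == 0)) =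
      seq.countP (fun v => ! pvP nodes (pvBuildGraph nodes edges) v) :=
    List.countP_congr (fun a ha => by rw [hc2 a ha])
  rw [e1, e2]
  simp

lemma pvAns_append (nodes : List Int) (edges : List (List Int)) (forest : List (List Int))
    (tree : List Int) :
    pvAns nodes edges (forest ++ [tree]) =
      (let c := tree.foldl
        (fun (c : Int × Int) node =>
          let nn := (pvIdxDict nodes).getD node 0
          let num := (PySem.List.pyGet? ((pvBuildGraph nodes edges).map (fun g => ((g.length : Int) - 1))) nn).getD 0
          ((if (PySem.Int.mod node 2 == 1 && PySem.Int.mod num 2 == 1) ||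
               (PySem.Int.mod node 2 == 0 && PySem.Int.mod num 2 == 0) then c.1 + 1 else c.1),
           (if (PySem.Int.mod node 2 == 0 && PySem.Int.mod num 2 == 1) ||
               (PySem.Int.mod node 2 == 1 && PySem.Int.mod num 2 == 0) then c.2 + 1 else c.2)))
        ((0 : Int), (0 : Int))
       ((if c.2 == 1 then (pvAns nodes edges forest).1 + 1 else (pvAns nodes edges forest).1),
        (if c.1 == 1 then (pvAns nodes edges forest).2 + 1 else (pvAns nodes edges forest).2))) := by
  unfold pvAns
  rw [List.foldl_append]
  rfl

lemma pvOuter (nodes : List Int) (edges : List (List Int)) (hpre : Pre_solution nodes edges) :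
    ∀ (is : List Int) (vis : List Bool) (forest : List (List Int)),
      vis.length = nodes.length →
      (∀ i ∈ is, ∃ k : Nat, k < nodes.length ∧ i = (k : Int)) →
      (is.foldl (fun (st : List Bool × Int × Int) i =>
          if st.1.getD i.toNat true then st
          else
            let r := pvStkB nodes (pvBuildGraph nodes edges) (pvFuel (pvBuildGraph nodes edges)) [i] (st.1, 0, 0)
            (r.1, (if r.2.2 == 1 then st.2.1 + 1 else st.2.1),
                  (if r.2.1 == 1 then st.2.2 + 1 else st.2.2)))
        (vis, pvAns nodes edges forest))
      = (let ra := is.foldl (fun (st : List Bool × List (List Int)) i =>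
            if st.1.getD i.toNat true then st
            else
              let t := pvDfsA (pvBuildGraph nodes edges) (pvSeqDict nodes) (pvFuel (pvBuildGraph nodes edges))
                         (pvAdj (pvBuildGraph nodes edges) i)
                         (st.1.set i.toNat true, [(pvSeqDict nodes).getD i 0])
              (t.1, st.2 ++ [t.2])) (vis, forest)
         (ra.1, pvAns nodes edges ra.2)) := by
  intro is
  induction is with
  | nil => intro vis forest _ _; rfl
  | cons i is ih =>
    intro vis forest hlen hval
    obtain ⟨k, hk, rfl⟩ := hval _ List.mem_cons_self
    rw [List.foldl_cons, List.foldl_cons]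
    cases hvis : vis.getD ((k : Int)).toNat true with
    | true =>
      simp only [if_true]
      exact ih vis forest hlen (fun j hj => hval j (List.mem_cons_of_mem _ hj))
    | false =>
      simp only [Bool.false_eq_true, if_false]
      have hC := pv_adj_len_le (pvBuildGraph nodes edges) (k : Int)
      have hcntset := pv_cnt_set_le vis ((k : Int)).toNat
      have hcnt := List.count_le_length (l := vis) (a := false)
      have hgl := pvGraph_length nodes edges
      -- A's dfs call in terms of the canonical recursion
      have hFadj : pvW (pvBuildGraph nodes edges) (vis.set ((k : Int)).toNat true)
          (pvAdj (pvBuildGraph nodes edges) (k : Int)) ≤ pvFuel (pvBuildGraph nodes edges) := by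
        simp only [pvW, pvFuel]
        have h1 : (vis.set ((k : Int)).toNat true).count false ≤ (pvBuildGraph nodes edges).length := by
          rw [hgl, ← hlen]; exact le_trans hcntset hcnt
        nlinarith
      have hbridge := pvDfsA_bridge (pvBuildGraph nodes edges) (pvSeqDict nodes)
        (pvFuel (pvBuildGraph nodes edges)) (pvAdj (pvBuildGraph nodes edges) (k : Int))
        (vis.set ((k : Int)).toNat true) [(pvSeqDict nodes).getD (k : Int) 0]
      rw [pvSeq_eq_recC _ _ _ _ hFadj] at hbridge
      -- the component of k
      have hcomp : pvRecC (pvBuildGraph nodes edges) [(k : Int)] vis =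
          ((pvRecC (pvBuildGraph nodes edges) (pvAdj (pvBuildGraph nodes edges) (k : Int))
             (vis.set ((k : Int)).toNat true)).1,
           (k : Int) :: (pvRecC (pvBuildGraph nodes edges) (pvAdj (pvBuildGraph nodes edges) (k : Int))
             (vis.set ((k : Int)).toNat true)).2) := by
        rw [pvRecC_cons_new (pvBuildGraph nodes edges) (k : Int) [] vis hvis]
        simp [pvRecC_nil]
      -- B's stack run in terms of the canonical recursion
      have hFi : pvW (pvBuildGraph nodes edges) vis [(k : Int)] ≤ pvFuel (pvBuildGraph nodes edges) := by
        simp only [pvW, pvFuel, List.length_cons, List.length_nil]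
        have h1 : vis.count false ≤ (pvBuildGraph nodes edges).length := by
          rw [hgl, ← hlen]; exact hcnt
        nlinarith
      have hstk : pvStkB nodes (pvBuildGraph nodes edges) (pvFuel (pvBuildGraph nodes edges))
          [(k : Int)] (vis, 0, 0) =
          ((pvRecC (pvBuildGraph nodes edges) [(k : Int)] vis).1,
           ((pvRecC (pvBuildGraph nodes edges) [(k : Int)] vis).2.countP
              (pvP nodes (pvBuildGraph nodes edges)) : Int),
           ((pvRecC (pvBuildGraph nodes edges) [(k : Int)] vis).2.countP
              (fun v => ! pvP nodes (pvBuildGraph nodes edges) v) : Int)) := by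
        rw [pvStkB_eq_stkC nodes (pvBuildGraph nodes edges) _ _ _ hFi]
        have hmain := pvMain nodes (pvBuildGraph nodes edges)
          (pvW (pvBuildGraph nodes edges) vis [(k : Int)]) [(k : Int)] [] vis 0 0 le_rfl
        simp only [List.append_nil] at hmain
        rw [hmain, pvStkC_nil]
        simp
      -- validity of the component's indices
      have hvalid : ∀ x ∈ (pvRecC (pvBuildGraph nodes edges) [(k : Int)] vis).2,
          ∃ k' : Nat, k' < nodes.length ∧ x = (k' : Int) := by
        refine pvRecC_valid (pvBuildGraph nodes edges) _ (pvGraph_closed nodes edges hpre)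
          (pvW (pvBuildGraph nodes edges) vis [(k : Int)]) [(k : Int)] vis le_rfl ?_
        intro v hv
        rw [List.mem_singleton.mp hv]
        exact ⟨k, hk, rfl⟩
      -- step equality
      rw [hbridge, hstk]
      have htree : [(pvSeqDict nodes).getD (k : Int) 0] ++
          (pvRecC (pvBuildGraph nodes edges) (pvAdj (pvBuildGraph nodes edges) (k : Int))
            (vis.set ((k : Int)).toNat true)).2.map (fun v => (pvSeqDict nodes).getD v 0) =
          (pvRecC (pvBuildGraph nodes edges) [(k : Int)] vis).2.map
            (fun v => (pvSeqDict nodes).getD v 0) := by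
        rw [hcomp]
        rfl
      rw [htree]
      have hnewlen : (pvRecC (pvBuildGraph nodes edges) [(k : Int)] vis).1.length = nodes.length := by
        rw [(pvRecC_mono (pvBuildGraph nodes edges) [(k : Int)] vis).2, hlen]
      have hih := ih (pvRecC (pvBuildGraph nodes edges) [(k : Int)] vis).1
        (forest ++ [(pvRecC (pvBuildGraph nodes edges) [(k : Int)] vis).2.map
          (fun v => (pvSeqDict nodes).getD v 0)])
        hnewlen (fun j hj => hval j (List.mem_cons_of_mem _ hj))
      have hansstep : pvAns nodes edges (forest ++
          [(pvRecC (pvBuildGraph nodes edges) [(k : Int)] vis).2.map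
            (fun v => (pvSeqDict nodes).getD v 0)]) =
          ((if (((pvRecC (pvBuildGraph nodes edges) [(k : Int)] vis).2.countP
              (fun v => ! pvP nodes (pvBuildGraph nodes edges) v) : Int)) == 1
            then (pvAns nodes edges forest).1 + 1 else (pvAns nodes edges forest).1),
           (if (((pvRecC (pvBuildGraph nodes edges) [(k : Int)] vis).2.countP
              (pvP nodes (pvBuildGraph nodes edges)) : Int)) == 1
            then (pvAns nodes edges forest).2 + 1 else (pvAns nodes edges forest).2)) := by
        rw [pvAns_append]
        rw [pvTreeCount nodes edges hpre.1 _ hvalid]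
      rw [← hansstep]
      have hc1 : (pvRecC (pvBuildGraph nodes edges) (pvAdj (pvBuildGraph nodes edges) (k : Int))
          (vis.set ((k : Int)).toNat true)).1 = (pvRecC (pvBuildGraph nodes edges) [(k : Int)] vis).1 := by
        rw [hcomp]
      rw [hc1]
      exact hih
  
-- ===== VERDICT (by name: the statement is the Claim_ definition above) =====
theorem solution_spec : Claim_equal_solution := by
  intro nodes edges _ hpre
  show solution nodes edges = solution_alt nodes edges
  unfold solution solution_alt
  have hval : ∀ i ∈ PySem.List.pyRange 0 (nodes.length : Int),
      ∃ k : Nat, k < nodes.length ∧ i = (k : Int) := by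
    intro i hi
    obtain ⟨h0, h1⟩ := PySem.List.mem_pyRange_one.mp hi
    exact ⟨i.toNat, by omega, by omega⟩
  have h := pvOuter nodes edges hpre (PySem.List.pyRange 0 (nodes.length : Int))
    (List.replicate nodes.length false) [] (List.length_replicate) hval
  have h0 : pvAns nodes edges [] = ((0 : Int), (0 : Int)) := rfl
  rw [h0] at h
  simp only at h ⊢
  rw [h]
  simp only [pvAns]
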